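-- pv_equiv track=rewrite | github.com/abdullahshaikh-0078/NEXUS-AI-2.0 | backend/src/rag_service/ingestion/chunkers.py | _tail_words
-- ===== SOURCE A (Python) =====
-- from collections.abc import Iterable
--
-- def _tail_words(words: Iterable[str], max_characters: int) -> list[str]:
--     reversed_words = list(words)[::-1]
--     selected: list[str] = []
--     total = 0
--     for word in reversed_words:
--         projected = total + len(word) + (1 if selected else 0)
--         if projected > max_characters:
--             break
--         selected.append(word)
--         total = projected
--     return list(reversed(selected))
-- ===== SOURCE B (Python) =====
-- def _tail_words(words, max_characters):
--     ws = list(words)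
--     # cumulative cost of keeping the last i+1 words: sum of lengths + (i) separators
--     costs = []
--     total = 0
--     for i, w in enumerate(reversed(ws)):
--         total += len(w) + (1 if i else 0)
--         costs.append(total)
--     # costs is nondecreasing: binary-search the largest k with costs[k-1] <= budget
--     lo, hi = 0, len(costs)
--     while lo < hi:
--         mid = (lo + hi) // 2
--         if costs[mid] <= max_characters:
--             lo = mid + 1
--         else:
--             hi = mid
--     return ws[len(ws) - lo:]
-- ===== Notes on version B (the rewrite author's own statement) =====
-- stated objective: alternative
-- what changed: Replaces A's break-loop that appends words and re-reverses with a prefix-sum array of cumulative tail costs plus a binary search for the largest fitting k, returning a single tail slice.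
import Mathlib
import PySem

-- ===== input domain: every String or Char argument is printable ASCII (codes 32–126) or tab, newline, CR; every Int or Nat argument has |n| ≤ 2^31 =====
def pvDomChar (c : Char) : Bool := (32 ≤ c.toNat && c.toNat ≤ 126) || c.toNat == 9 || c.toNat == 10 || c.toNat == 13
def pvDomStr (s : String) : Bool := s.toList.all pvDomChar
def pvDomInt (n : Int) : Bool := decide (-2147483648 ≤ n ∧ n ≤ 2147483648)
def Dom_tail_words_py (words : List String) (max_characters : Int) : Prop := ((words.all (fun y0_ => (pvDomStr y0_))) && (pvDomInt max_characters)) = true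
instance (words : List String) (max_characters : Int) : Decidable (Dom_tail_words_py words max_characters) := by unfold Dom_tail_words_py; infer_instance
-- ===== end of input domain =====

-- B replaces A's break-loop (append words, re-reverse) with a prefix-sum cost array,
-- a binary search for the largest fitting tail length, and one tail slice (alternative decomposition, same cost).


-- ===== PORT A =====
-- the for-loop with its break: state (selected, total), word by word over reversed_words
def tailLoopA (maxC : Int) : List String → List String → Int → List String
  | [], sel, _ => sel
  | w :: rest, sel, total =>
    let projected := total + PySem.Str.len w + (if sel.isEmpty then 0 else 1)
    if projected > maxC then sel
    else tailLoopA maxC rest (sel ++ [w]) projected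

-- list(words)[::-1] is words.reverse (PySem.List.slice?_none_none_neg_one)
def tail_words_py (words : List String) (max_characters : Int) : List String :=
  (tailLoopA max_characters words.reverse [] 0).reverse

-- ===== PORT B =====
-- the enumerate(reversed(ws)) loop building the cumulative cost list `costs`
def buildCosts : List String → Nat → Int → List Int
  | [], _, _ => []
  | w :: rest, i, total =>
    let t := total + PySem.Str.len w + (if i ≠ 0 then 1 else 0)
    t :: buildCosts rest (i + 1) t

-- the while lo < hi binary-search loop; costs[mid] is in range whenever lo < hi ≤ len, so getD is exact
def bsearchB (costs : List Int) (maxC : Int) (lo hi : Nat) : Nat :=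
  if lo < hi then
    let mid := (lo + hi) / 2
    if costs.getD mid 0 ≤ maxC then bsearchB costs maxC (mid + 1) hi
    else bsearchB costs maxC lo mid
  else lo
termination_by hi - lo
decreasing_by all_goals omega

def tail_words_py_alt (words : List String) (max_characters : Int) : List String :=
  let costs := buildCosts words.reverse 0 0
  let k := bsearchB costs max_characters 0 costs.length
  -- ws[len(ws) - k:] with 0 ≤ len - k ≤ len, i.e. drop
  words.drop (words.length - k)

-- ===== PRECONDITION & SPEC =====
def Spec_tail_words_py (words : List String) (max_characters : Int) (out : List String) : Prop := out = tail_words_py_alt words max_characters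
instance (words : List String) (max_characters : Int) (out : List String) : Decidable (Spec_tail_words_py words max_characters out) := by unfold Spec_tail_words_py; infer_instance

-- ===== CLAIM (what is proved, stated in full; the proofs are below) =====
def Claim_equal_tail_words_py : Prop := ∀ (words : List String) (max_characters : Int), Dom_tail_words_py words max_characters → Spec_tail_words_py words max_characters (tail_words_py words max_characters)

-- ===== LEMMAS AND PROOFS =====

-- number of leading costs within budget
def twLen (a : List Int) (x : Int) : Nat := (a.takeWhile (fun c => decide (c ≤ x))).length

theorem buildCosts_length (l : List String) : ∀ (i : Nat) (total : Int), (buildCosts l i total).length = l.length := by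
  induction l with
  | nil => intro i total; rfl
  | cons w rest ih => intro i total; simp [buildCosts, ih]

theorem buildCosts_lb (l : List String) : ∀ (i : Nat) (total : Int), ∀ c ∈ buildCosts l i total, total ≤ c := by
  induction l with
  | nil => intro i total c hc; simp [buildCosts] at hc
  | cons w rest ih =>
    intro i total c hc
    simp only [buildCosts, List.mem_cons] at hc
    have hlen : (0 : Int) ≤ PySem.Str.len w := by simp [PySem.Str.len_eq]
    rcases hc with h | h
    · subst h; split_ifs <;> omega
    · have := ih (i + 1) _ c h
      split_ifs at this <;> omega

theorem buildCosts_pairwise (l : List String) : ∀ (i : Nat) (total : Int), (buildCosts l i total).Pairwise (· ≤ ·) := by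
  induction l with
  | nil => intro i total; simp [buildCosts]
  | cons w rest ih =>
    intro i total
    simp only [buildCosts, List.pairwise_cons]
    exact ⟨fun c hc => buildCosts_lb rest _ _ c hc, ih _ _⟩

theorem loopA_eq_take (maxC : Int) (l : List String) : ∀ (sel : List String) (i : Nat) (total : Int),
    (sel.isEmpty = true ↔ i = 0) →
    tailLoopA maxC l sel total = sel ++ l.take (twLen (buildCosts l i total) maxC) := by
  induction l with
  | nil => intro sel i total _; simp [tailLoopA, buildCosts, twLen]
  | cons w rest ih =>
    intro sel i total hiff
    have hsel : (if sel.isEmpty then (0 : Int) else 1) = (if i ≠ 0 then 1 else 0) := by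
      by_cases h : i = 0
      · simp [h, hiff.mpr h]
      · have hse : sel.isEmpty = false := by
          cases hse : sel.isEmpty
          · rfl
          · exact absurd (hiff.mp hse) h
        simp [hse, h]
    simp only [tailLoopA, buildCosts, hsel]
    simp only [PySem.Str.len_eq, ite_not, gt_iff_lt,
      show (w.toList.length : Int) = (w.length : Int) from rfl]
    by_cases hle : total + PySem.Str.len w + (if i ≠ 0 then 1 else 0) ≤ maxC
    all_goals simp only [PySem.Str.len_eq, ite_not,
      show (w.toList.length : Int) = (w.length : Int) from rfl] at hle
    · rw [if_neg (not_lt.mpr hle), ih (sel ++ [w]) (i + 1) _ (by simp)]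
      simp [twLen, hle, List.append_assoc]
    · rw [if_pos (not_le.mp hle)]
      simp [twLen, not_le.mp hle]

theorem twLen_le (a : List Int) (x : Int) : twLen a x ≤ a.length :=
  (List.takeWhile_sublist _).length_le

theorem twLen_lt (a : List Int) (x : Int) : ∀ j, j < twLen a x → a.getD j 0 ≤ x := by
  induction a with
  | nil => intro j h; simp [twLen] at h
  | cons c rest ih =>
    intro j h
    by_cases hc : c ≤ x
    · cases j with
      | zero => simpa using hc
      | succ j =>
        simp [twLen, hc] at h
        simpa using ih j (by simpa [twLen] using h)
    · simp [twLen, hc] at h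

theorem twLen_ge (a : List Int) (x : Int) (hp : a.Pairwise (· ≤ ·)) :
    ∀ j, twLen a x ≤ j → j < a.length → ¬ (a.getD j 0 ≤ x) := by
  induction a with
  | nil => intro j _ h; simp at h
  | cons c rest ih =>
    intro j hle hlt
    rcases List.pairwise_cons.mp hp with ⟨hc, hrest⟩
    by_cases hcx : c ≤ x
    · cases j with
      | zero => simp [twLen, hcx] at hle
      | succ j =>
        simp [twLen, hcx] at hle
        simpa using ih hrest j (by simpa [twLen] using hle) (by simpa using hlt)
    · cases j with
      | zero => simpa using hcx
      | succ j =>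
        intro habs
        have hjlt : j < rest.length := by simpa using hlt
        have hmem : rest.getD j 0 ∈ rest := by
          rw [List.getD_eq_getElem rest 0 hjlt]; exact rest.getElem_mem hjlt
        exact hcx (le_trans (hc _ hmem) (by simpa using habs))

theorem bsearchB_eq (a : List Int) (x : Int) (hp : a.Pairwise (· ≤ ·)) :
    ∀ (n lo hi : Nat), hi - lo ≤ n → lo ≤ twLen a x → twLen a x ≤ hi → hi ≤ a.length →
    bsearchB a x lo hi = twLen a x := by
  intro n
  induction n with
  | zero =>
    intro lo hi hfuel h1 h2 _
    rw [bsearchB, if_neg (by omega)]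
    omega
  | succ n ih =>
    intro lo hi hfuel h1 h2 hlen
    rw [bsearchB]
    by_cases hlh : lo < hi
    · rw [if_pos hlh]
      have hmid1 : lo ≤ (lo + hi) / 2 := by omega
      have hmid2 : (lo + hi) / 2 < hi := by omega
      by_cases hm : a.getD ((lo + hi) / 2) 0 ≤ x
      · rw [if_pos hm]
        have : (lo + hi) / 2 < twLen a x := by
          by_contra hcon
          exact twLen_ge a x hp _ (by omega) (by omega) hm
        exact ih _ _ (by omega) (by omega) h2 hlen
      · rw [if_neg hm]
        have : twLen a x ≤ (lo + hi) / 2 := by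
          by_contra hcon
          exact hm (twLen_lt a x _ (by omega))
        exact ih _ _ (by omega) h1 this (by omega)
    · rw [if_neg hlh]; omega

theorem tail_words_py_spec_aux (words : List String) (maxC : Int) :
    tail_words_py words maxC = tail_words_py_alt words maxC := by
  have hlen : (buildCosts words.reverse 0 0).length = words.length := by
    rw [buildCosts_length]; exact List.length_reverse
  have hp := buildCosts_pairwise words.reverse 0 0
  have ht := twLen_le (buildCosts words.reverse 0 0) maxC
  have hb := bsearchB_eq (buildCosts words.reverse 0 0) maxC hp
      (buildCosts words.reverse 0 0).length 0 (buildCosts words.reverse 0 0).length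
      (by omega) (by omega) ht (le_refl _)
  have hA := loopA_eq_take maxC words.reverse [] 0 0 (by simp)
  show (tailLoopA maxC words.reverse [] 0).reverse =
    words.drop (words.length - bsearchB (buildCosts words.reverse 0 0) maxC 0 (buildCosts words.reverse 0 0).length)
  rw [hA, hb]
  simp only [List.nil_append, List.reverse_take, List.reverse_reverse, List.length_reverse]

-- ===== VERDICT (by name: the statement is the Claim_ definition above) =====
theorem tail_words_py_spec : Claim_equal_tail_words_py := by
  intro words maxC _
  exact tail_words_py_spec_aux words maxC
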